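-- pv_equiv track=rewrite | github.com/DDTantor/UVa | problems/271.py | solve
-- ===== SOURCE A (Python) =====
-- def solve(s):
--     cnt = 0;
--     for c in s[::-1]:
--         if ord(c) in range(ord('p'), ord('z') + 1):
--             cnt += 1
--         elif c == 'N':
--             if cnt == 0:
--                 return False
--         elif c in "CDEI":
--             if cnt < 2:
--                 return False
--
--             cnt -= 1
--         else:
--             return False
--
--     return cnt == 1
-- ===== SOURCE B (Python) =====
-- def solve(s):
--     # Forward demand-counter: `need` = number of formulas still required.
--     need = 1
--     for c in s:
--         if need == 0:
--             return False
--         if 'p' <= c <= 'z':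
--             need -= 1
--         elif c in "CDEI":
--             need += 1
--         elif c != 'N':
--             return False
--     return need == 0
-- ===== Notes on version B (the rewrite author's own statement) =====
-- stated objective: alternative
-- what changed: Replaced the reverse-scan supply counter (count available operands right-to-left) with a forward left-to-right demand counter seeded to expect one formula, with no reversed copy of the string.
import Mathlib
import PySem

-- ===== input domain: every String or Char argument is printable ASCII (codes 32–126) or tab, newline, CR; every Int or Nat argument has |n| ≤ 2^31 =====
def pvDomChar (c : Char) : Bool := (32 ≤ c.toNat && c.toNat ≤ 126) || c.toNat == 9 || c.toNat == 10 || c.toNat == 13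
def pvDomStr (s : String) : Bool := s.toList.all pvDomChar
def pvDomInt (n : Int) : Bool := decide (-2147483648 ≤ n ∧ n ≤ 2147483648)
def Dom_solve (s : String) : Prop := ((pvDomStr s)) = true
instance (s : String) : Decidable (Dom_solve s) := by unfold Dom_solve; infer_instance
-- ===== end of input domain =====

-- B replaces A's right-to-left supply counter with a left-to-right demand counter; same O(n) cost, no reversed copy.

-- ===== PORT A =====
-- A iterates over s[::-1] with a counter cnt of completed subformulas.
def solveGo (l : List Char) (cnt : Int) : Bool :=
  match l with
  | [] => cnt == 1
  | c :: rest =>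
    if 'p'.toNat ≤ c.toNat ∧ c.toNat ≤ 'z'.toNat then solveGo rest (cnt + 1)
    else if c = 'N' then
      if cnt = 0 then false else solveGo rest cnt
    else if c = 'C' ∨ c = 'D' ∨ c = 'E' ∨ c = 'I' then
      if cnt < 2 then false else solveGo rest (cnt - 1)
    else false

def solve (s : String) : Bool := solveGo s.toList.reverse 0

-- ===== PORT B =====
-- B iterates forward with `need`, the number of formulas still required (seeded to 1).
def altGo (l : List Char) (need : Int) : Bool :=
  match l with
  | [] => need == 0
  | c :: rest =>
    if need = 0 then false
    else if 'p' ≤ c ∧ c ≤ 'z' then altGo rest (need - 1)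
    else if c = 'C' ∨ c = 'D' ∨ c = 'E' ∨ c = 'I' then altGo rest (need + 1)
    else if c ≠ 'N' then false
    else altGo rest need

def solve_alt (s : String) : Bool := altGo s.toList 1

-- ===== PRECONDITION & SPEC =====
def Spec_solve (s : String) (out : Bool) : Prop := out = solve_alt s
instance (s : String) (out : Bool) : Decidable (Spec_solve s out) := by unfold Spec_solve; infer_instance

-- ===== CLAIM (what is proved, stated in full; the proofs are below) =====
def Claim_equal_solve : Prop := ∀ (s : String), Dom_solve s → Spec_solve s (solve s)

-- ===== LEMMAS AND PROOFS =====

-- One step of A's counter automaton, as a partial function (none = early `return False`).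
def pvStep (c : Char) (k : Int) : Option Int :=
  if 'p'.toNat ≤ c.toNat ∧ c.toNat ≤ 'z'.toNat then some (k + 1)
  else if c = 'N' then (if k = 0 then none else some k)
  else if c = 'C' ∨ c = 'D' ∨ c = 'E' ∨ c = 'I' then (if k < 2 then none else some (k - 1))
  else none

-- A's counter run over a list, threading the accumulator.
def pvRun (l : List Char) (k : Int) : Option Int :=
  match l with
  | [] => some k
  | c :: rest =>
    match pvStep c k with
    | none => none
    | some k' => pvRun rest k'

theorem solveGo_eq_run (l : List Char) (k : Int) :
    solveGo l k = ((pvRun l k).map (fun r => r == 1)).getD false := by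
  induction l generalizing k with
  | nil => simp [solveGo, pvRun]
  | cons c rest ih =>
    simp only [solveGo, pvRun, pvStep]
    split_ifs <;> simp [ih]

-- A's counter run over the REVERSE of l, by structural recursion on l.
def pvF : List Char → Option Int
  | [] => some 0
  | c :: t => (pvF t).bind (pvStep c)

theorem pvRun_snoc (l : List Char) (c : Char) (k : Int) :
    pvRun (l ++ [c]) k = (pvRun l k).bind (pvStep c) := by
  induction l generalizing k with
  | nil =>
    simp only [List.nil_append, pvRun]
    cases hS : pvStep c k <;> simp [hS]
  | cons d rest ih =>
    simp only [List.cons_append, pvRun]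
    cases hS : pvStep d k <;> simp [ih]

theorem pvRun_reverse (l : List Char) : pvRun l.reverse 0 = pvF l := by
  induction l with
  | nil => rfl
  | cons c t ih => simpa [pvF, pvRun_snoc] using congrArg (fun o => o.bind (pvStep c)) ih

-- A nonempty list never runs to counter 0 (a nonempty string is never 0 formulas).
theorem pvF_pos (l : List Char) (k : Int) (h : pvF l = some k) :
    (l = [] ∧ k = 0) ∨ 1 ≤ k := by
  induction l generalizing k with
  | nil =>
    left
    refine ⟨rfl, ?_⟩
    simp [pvF] at h
    omega
  | cons c t ih =>
    simp only [pvF] at h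
    cases hFt : pvF t with
    | none => rw [hFt] at h; simp at h
    | some k' =>
      rw [hFt] at h
      have hk' : k' = 0 ∨ 1 ≤ k' := by
        rcases ih k' hFt with ⟨_, h0⟩ | h1
        · exact Or.inl h0
        · exact Or.inr h1
      have h' : pvStep c k' = some k := h
      rw [pvStep] at h'
      split_ifs at h' <;>
        first
          | exact Option.noConfusion h'
          | (injection h' with he; right; omega)

theorem char_le_iff (a b : Char) : a ≤ b ↔ a.toNat ≤ b.toNat := by
  constructor <;> (intro h; exact h)

-- Main bridge: B's forward demand run equals "A's reverse run yields exactly `need`".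
theorem altGo_eq_pvF (l : List Char) (need : Int) (hn : 0 ≤ need) :
    altGo l need = (pvF l == some need) := by
  induction l generalizing need with
  | nil =>
    simp only [altGo, pvF]
    simp [eq_comm]
  | cons c t ih =>
    simp only [altGo, pvF]
    by_cases h0 : need = 0
    · subst h0
      rw [if_pos rfl]
      cases hF : (pvF t).bind (pvStep c) with
      | none => simp
      | some k =>
        rcases pvF_pos (c :: t) k (by simpa [pvF] using hF) with ⟨hnil, _⟩ | hk
        · exact absurd hnil (List.cons_ne_nil _ _)
        · have hk0 : ¬k = 0 := by omega
          simp [hk0]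
    · rw [if_neg h0]
      by_cases hop : 'p' ≤ c ∧ c ≤ 'z'
      · have hop' : 'p'.toNat ≤ c.toNat ∧ c.toNat ≤ 'z'.toNat :=
          ⟨(char_le_iff _ _).mp hop.1, (char_le_iff _ _).mp hop.2⟩
        rw [if_pos hop, ih (need - 1) (by omega)]
        cases hFt : pvF t with
        | none => simp
        | some k =>
          have hs : (some k).bind (pvStep c) = some (k + 1) := by
            show pvStep c k = some (k + 1)
            rw [pvStep, if_pos hop']
          rw [hs, Bool.eq_iff_iff]
          simp
          omega
      · rw [if_neg hop]
        have hop' : ¬('p'.toNat ≤ c.toNat ∧ c.toNat ≤ 'z'.toNat) := by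
          intro h
          exact hop ⟨(char_le_iff _ _).mpr h.1, (char_le_iff _ _).mpr h.2⟩
        by_cases hbin : c = 'C' ∨ c = 'D' ∨ c = 'E' ∨ c = 'I'
        · have hN' : ¬(c = 'N') := by rcases hbin with rfl | rfl | rfl | rfl <;> decide
          have hs : ∀ k : Int, pvStep c k = if k < 2 then none else some (k - 1) := by
            intro k
            rw [pvStep, if_neg hop', if_neg hN', if_pos hbin]
          rw [if_pos hbin, ih (need + 1) (by omega)]
          cases hFt : pvF t with
          | none => simp
          | some k =>
            have hs' : (some k).bind (pvStep c) = if k < 2 then none else some (k - 1) := hs k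
            rw [hs']
            by_cases hk2 : k < 2
            · rw [if_pos hk2, Bool.eq_iff_iff]
              simp
              omega
            · rw [if_neg hk2, Bool.eq_iff_iff]
              simp
              omega
        · rw [if_neg hbin]
          by_cases hN : c = 'N'
          · subst hN
            rw [if_neg (by decide : ¬('N' ≠ 'N')), ih need hn]
            cases hFt : pvF t with
            | none => simp
            | some k =>
              have hstep : (some k).bind (pvStep 'N') = if k = 0 then none else some k := by
                show pvStep 'N' k = _
                rw [pvStep, if_neg (by decide), if_pos rfl]
              rw [hstep]
              by_cases hk0 : k = 0
              · rw [if_pos hk0, Bool.eq_iff_iff]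
                simp
                omega
              · rw [if_neg hk0]
          · rw [if_pos hN]
            have hstep : ∀ k : Int, pvStep c k = none := by
              intro k
              rw [pvStep, if_neg hop', if_neg hN, if_neg hbin]
            cases hFt : pvF t with
            | none => simp
            | some k =>
              have hs' : (some k).bind (pvStep c) = none := hstep k
              rw [hs']
              rfl

-- ===== VERDICT (by name: the statement is the Claim_ definition above) =====
theorem solve_spec : Claim_equal_solve := by
  intro s _
  unfold Spec_solve solve solve_alt
  rw [solveGo_eq_run, pvRun_reverse, altGo_eq_pvF _ _ (by omega)]
  cases hF : pvF s.toList <;> simp
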